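-- pv_equiv track=rewrite | github.com/6stranik6/Synergy | functions/factorial.py | factorial_list
-- ===== SOURCE A (Python) =====
-- def factorial_list(num):
--     factorials = []
--     for i in range(num, 0, -1):
--         factorial = 1
--         for j in range(1, i + 1):
--             factorial *= j
--         factorials.append(factorial)
--     return factorials
-- ===== SOURCE B (Python) =====
-- def factorial_list(num):
--     res = []
--     p = 1
--     for i in range(1, num + 1):
--         p *= i
--         res.append(p)
--     res.reverse()
--     return res
-- ===== Notes on version B (the rewrite author's own statement) =====
-- stated objective: faster
-- what changed: Replaces the nested loop that recomputes each factorial from scratch with a single ascending pass maintaining a running product, then reverses to the descending order.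
import Mathlib
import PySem

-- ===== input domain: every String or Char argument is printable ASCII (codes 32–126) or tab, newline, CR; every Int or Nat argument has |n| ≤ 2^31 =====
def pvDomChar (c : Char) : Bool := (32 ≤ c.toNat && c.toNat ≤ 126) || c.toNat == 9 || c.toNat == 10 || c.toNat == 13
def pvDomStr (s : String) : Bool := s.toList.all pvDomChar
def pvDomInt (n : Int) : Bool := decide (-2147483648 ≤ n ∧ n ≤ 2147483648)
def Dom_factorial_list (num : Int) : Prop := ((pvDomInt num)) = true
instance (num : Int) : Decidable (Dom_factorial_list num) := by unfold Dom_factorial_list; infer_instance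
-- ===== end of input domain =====

-- B replaces A's nested loop (each factorial recomputed from scratch) with one ascending
-- running-product pass followed by a reverse; objective: faster (O(n) instead of O(n^2)).

-- ===== PORT A =====
def factorial_list (num : Int) : List Int :=
  (PySem.List.pyRange num 0 (-1)).foldl
    (fun factorials i =>
      factorials ++ [(PySem.List.pyRange 1 (i + 1) 1).foldl (fun factorial j => factorial * j) 1])
    []

-- ===== PORT B =====
def factorial_list_alt (num : Int) : List Int :=
  let st := (PySem.List.pyRange 1 (num + 1) 1).foldl
    (fun (st : Int × List Int) i => (st.1 * i, st.2 ++ [st.1 * i])) (1, [])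
  st.2.reverse

-- ===== PRECONDITION & SPEC =====
def Spec_factorial_list (num : Int) (out : List Int) : Prop := out = factorial_list_alt num
instance (num : Int) (out : List Int) : Decidable (Spec_factorial_list num out) := by unfold Spec_factorial_list; infer_instance

-- ===== CLAIM (what is proved, stated in full; the proofs are below) =====
def Claim_equal_factorial_list : Prop := ∀ (num : Int), Dom_factorial_list num → Spec_factorial_list num (factorial_list num)

-- ===== LEMMAS AND PROOFS =====

/-- the value A's inner loop computes for a given `i` -/
def pvFact (i : Int) : Int :=
  (PySem.List.pyRange 1 (i + 1) 1).foldl (fun factorial j => factorial * j) 1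

theorem pvFact_succ (n : Int) (h : 0 ≤ n) : pvFact (n + 1) = pvFact n * (n + 1) := by
  unfold pvFact
  rw [PySem.List.pyRange_one_succ_right (show (1 : Int) ≤ n + 1 by omega), List.foldl_append]
  rfl

theorem foldl_append_map {α β : Type} (f : α → β) (l : List α) (init : List β) :
    l.foldl (fun acc i => acc ++ [f i]) init = init ++ l.map f := by
  induction l generalizing init with
  | nil => simp
  | cons x xs ih => simp [List.foldl, ih]

theorem portA_eq (num : Int) :
    factorial_list num = (PySem.List.pyRange num 0 (-1)).map pvFact := by
  unfold factorial_list
  rw [foldl_append_map]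
  rfl

theorem portB_state (n : Int) (h : 0 ≤ n) :
    (PySem.List.pyRange 1 (n + 1) 1).foldl
      (fun (st : Int × List Int) i => (st.1 * i, st.2 ++ [st.1 * i])) (1, [])
      = (pvFact n, (PySem.List.pyRange 1 (n + 1) 1).map pvFact) := by
  induction n, h using Int.le_induction with
  | base =>
      rw [PySem.List.pyRange_one_eq_nil (by omega)]
      simp [pvFact, PySem.List.pyRange_one_eq_nil]
  | succ m hm ih =>
      rw [show m + 1 + 1 = (m + 1) + 1 from rfl,
        PySem.List.pyRange_one_succ_right (show (1 : Int) ≤ m + 1 by omega), List.foldl_append,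
        List.map_append, ih]
      simp [pvFact_succ m hm]

theorem factorial_list_eq_alt (num : Int) : factorial_list num = factorial_list_alt num := by
  by_cases h : 0 ≤ num
  · rw [portA_eq]
    unfold factorial_list_alt
    rw [portB_state num h]
    simp [PySem.List.pyRange_neg_one_eq_reverse]
  · rw [portA_eq]
    unfold factorial_list_alt
    rw [PySem.List.pyRange_neg_one_eq_nil (by omega : num ≤ 0),
      PySem.List.pyRange_one_eq_nil (by omega : num + 1 ≤ 1)]
    rfl

-- ===== VERDICT (by name: the statement is the Claim_ definition above) =====
theorem factorial_list_spec : Claim_equal_factorial_list := by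
  intro num _
  exact factorial_list_eq_alt num
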